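-- pv_equiv track=rewrite | github.com/MasKong/Algorithms | shence_2.py | f
-- ===== SOURCE A (Python) =====
-- def f(l):
--     if len(l) == 0:
--         return 0
--     if len(l) == 1:
--         if l[0] == 0:
--             return 1
--         else:
--             return 0
--     # res = [l[0]]
--     res = 0
--     idiot = sum(l[1:])
--     n = len(l)
--     for i in range(0, n-1):
--         if l[i] == -idiot:
--             inter = n-i
--             if inter > res:
--                 res = inter
--         else:
--             idiot -= l[i+1]
--     return res
-- ===== SOURCE B (Python) =====
-- def f(l):
--     n = len(l)
--     if n == 0:
--         return 0
--     if n == 1: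
--         return 1 if l[0] == 0 else 0
--     for i in range(n - 1):
--         if sum(l[i:]) == 0:
--             return n - i
--     return 0
-- ===== Notes on version B (the rewrite author's own statement) =====
-- stated objective: simpler
-- what changed: B returns n-i for the first i in [0, n-2] whose suffix sums to zero, recomputing each suffix sum directly, instead of A's single pass with an incrementally adjusted (and after a match stale) running sum and a max accumulator.
import Mathlib
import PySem

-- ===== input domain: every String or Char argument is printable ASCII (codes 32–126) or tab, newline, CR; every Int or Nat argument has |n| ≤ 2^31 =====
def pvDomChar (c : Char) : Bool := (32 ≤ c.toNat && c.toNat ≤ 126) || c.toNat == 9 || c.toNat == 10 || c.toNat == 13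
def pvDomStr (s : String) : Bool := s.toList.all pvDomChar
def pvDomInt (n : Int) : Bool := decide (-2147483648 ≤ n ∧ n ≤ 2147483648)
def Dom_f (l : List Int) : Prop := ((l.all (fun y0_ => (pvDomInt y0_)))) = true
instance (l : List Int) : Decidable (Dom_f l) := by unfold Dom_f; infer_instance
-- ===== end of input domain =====

-- B replaces A's single pass with an incrementally adjusted running sum by a direct scan that
-- recomputes each suffix sum and returns at the first zero-sum suffix (objective: simpler).

-- ===== PORT A =====
-- loop body of A's for-loop, state (res, idiot)
def fStep (l : List Int) (n : Int) (st : Int × Int) (i : Int) : Int × Int :=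
  if PySem.List.pyGetD l i 0 = -st.2 then
    (if n - i > st.1 then (n - i, st.2) else st)
  else
    (st.1, st.2 - PySem.List.pyGetD l (i + 1) 0)

def f (l : List Int) : Int :=
  if l.length = 0 then 0
  else if l.length = 1 then
    (if PySem.List.pyGetD l 0 0 = 0 then 1 else 0)
  else
    let idiot := (PySem.List.slice l (some 1) none).sum
    let n : Int := l.length
    ((PySem.List.pyRange 0 (n - 1) 1).foldl (fStep l n) (0, idiot)).1

-- ===== PORT B =====
-- fuel = l.length bounds the scan; structural recursion on the fuel
def f_alt_go (l : List Int) : Nat → Nat → Int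
  | 0, _ => 0
  | k + 1, i =>
    if i < l.length - 1 then
      if (l.drop i).sum = 0 then (l.length : Int) - i else f_alt_go l k (i + 1)
    else 0

def f_alt (l : List Int) : Int :=
  if l.length = 0 then 0
  else if l.length = 1 then
    (if PySem.List.pyGetD l 0 0 = 0 then 1 else 0)
  else f_alt_go l l.length 0

-- ===== PRECONDITION & SPEC =====
def Spec_f (l : List Int) (out : Int) : Prop := out = f_alt l
instance (l : List Int) (out : Int) : Decidable (Spec_f l out) := by unfold Spec_f; infer_instance

-- ===== CLAIM (what is proved, stated in full; the proofs are below) =====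
def Claim_equal_f : Prop := ∀ (l : List Int), Dom_f l → Spec_f l (f l)

-- ===== LEMMAS AND PROOFS =====

-- After a match, res is already ≥ every later n - i, so the rest of the loop never changes res.
theorem fStep_post (l : List Int) (n a : Int) (res idiot : Int)
    (h : n - a ≤ res) :
    ((PySem.List.pyRange a (n - 1) 1).foldl (fStep l n) (res, idiot)).1 = res := by
  by_cases hab : n - 1 ≤ a
  · rw [PySem.List.pyRange_one_eq_nil hab]; rfl
  · have hk : ((n - 1) - a).toNat ≠ 0 := by omega
    rw [PySem.List.pyRange_one_cons (by omega : a < n - 1)]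
    simp only [List.foldl_cons]
    have hstep : ∀ idiot' : Int, (fStep l n (res, idiot) a).1 = res ∧
        ((fStep l n (res, idiot) a) = (res, (fStep l n (res, idiot) a).2)) := by
      intro _
      unfold fStep
      split_ifs with h1 h2
      · omega
      · simp
      · simp
    obtain ⟨h1, h2⟩ := hstep idiot
    rw [h2]
    exact fStep_post l n (a + 1) res _ (by omega)
termination_by ((n - 1) - a).toNat
decreasing_by omega

theorem main_loop (l : List Int) (k : Nat) : ∀ (i : Nat), l.length - 1 ≤ i + k →
    ((PySem.List.pyRange (i : Int) ((l.length : Int) - 1) 1).foldl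
        (fStep l l.length) (0, (l.drop (i + 1)).sum)).1 = f_alt_go l k i := by
  induction k with
  | zero =>
    intro i hk
    rw [PySem.List.pyRange_one_eq_nil (by omega)]
    rfl
  | succ k ih =>
    intro i hk
    by_cases h : i < l.length - 1
    · have hi : (i : Int) < (l.length : Int) - 1 := by omega
      rw [PySem.List.pyRange_one_cons hi]
      simp only [List.foldl_cons]
      have hilen : i < l.length := by omega
      have hi1len : i + 1 < l.length := by omega
      have hget : PySem.List.pyGetD l (i : Int) 0 = l[i] :=
        PySem.List.pyGetD_ofNat l i 0 hilen
      have hdropi : l[i] :: l.drop (i + 1) = l.drop i := List.getElem_cons_drop hilen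
      have hsum : (l.drop i).sum = l[i] + (l.drop (i + 1)).sum := by
        rw [← hdropi, List.sum_cons]
      simp only [f_alt_go, if_pos h]
      by_cases hc : (l.drop i).sum = 0
      · -- match: res set to n - i, stays there
        have hcond : PySem.List.pyGetD l (i : Int) 0 = -(l.drop (i + 1)).sum := by
          rw [hget]; omega
        have hstep : fStep l l.length (0, (l.drop (i + 1)).sum) (i : Int)
            = ((l.length : Int) - i, (l.drop (i + 1)).sum) := by
          dsimp only [fStep]
          rw [if_pos hcond, if_pos (by omega : ((l.length : Int) - i > 0))]
        rw [hstep, if_pos hc]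
        exact fStep_post l (l.length : Int) ((i : Int) + 1) _ _ (by omega)
      · -- no match: idiot becomes the next suffix sum
        have hcond : ¬ PySem.List.pyGetD l (i : Int) 0 = -(l.drop (i + 1)).sum := by
          rw [hget]; omega
        have hget1 : PySem.List.pyGetD l ((i : Int) + 1) 0 = l[i + 1] := by
          have hc1 : ((i : Int) + 1) = ((i + 1 : Nat) : Int) := by push_cast; ring
          rw [hc1]
          exact PySem.List.pyGetD_ofNat l (i + 1) 0 hi1len
        have hdrop1 : l[i + 1] :: l.drop (i + 2) = l.drop (i + 1) :=
          List.getElem_cons_drop hi1len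
        have hstep : fStep l l.length (0, (l.drop (i + 1)).sum) (i : Int)
            = (0, (l.drop (i + 2)).sum) := by
          dsimp only [fStep]
          rw [if_neg hcond, hget1, Prod.mk.injEq]
          refine ⟨rfl, ?_⟩
          rw [← hdrop1, List.sum_cons]; ring
        rw [hstep, if_neg hc]
        have hcast : (i : Int) + 1 = ((i + 1 : Nat) : Int) := by push_cast; ring
        rw [hcast]
        exact ih (i + 1) (by omega)
    · rw [PySem.List.pyRange_one_eq_nil (by omega)]
      simp [f_alt_go, h]

-- ===== VERDICT (by name: the statement is the Claim_ definition above) =====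
theorem f_spec : Claim_equal_f := by
  intro l _
  unfold Spec_f f f_alt
  by_cases h0 : l.length = 0
  · simp [h0]
  · by_cases h1 : l.length = 1
    · simp [h1]
    · simp only [if_neg h0, if_neg h1]
      have hslice : PySem.List.slice l (some 1) none = l.drop 1 := by
        simp [PySem.List.slice_from_one, List.drop_one]
      have h := main_loop l l.length 0 (by omega)
      simpa [hslice] using h
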